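-- pv_equiv track=rewrite | github.com/pypi-data/pypi-mirror-132 | packages/sedatatools/sedatatools-1.1.0-py2.py3-none-any.whl/sedatatools/facility_tagging/__init__.py | size_category_tagging
-- ===== SOURCE A (Python) =====
-- from typing import Literal
--
-- def size_category_tagging(size_text: str) -> Literal["Small", "Medium", "Large"]:
--     """
--     Categorizes size into small, medium or large based on the area
--     :param pricing: dataframe consisting of pricing data for one week
--     :return: size category (small, medium or large)
--     """
--
--     tmp_char = ''
--     dig_enc = False
--     tmp_dimensions = []
--
--     for char in size_text:
--         if char.isdigit():
--             tmp_char = tmp_char + char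
--         else:
--             tmp_dimensions.append(tmp_char)
--             tmp_char = ''
--     else:
--         tmp_dimensions.append(tmp_char)
--
--     tmp_dimensions = [dim for dim in tmp_dimensions if dim != '']
--
--     size_sq_ft = int(tmp_dimensions[0]) * int(tmp_dimensions[1])
--
--     if size_sq_ft < 100:
--         return "Small"
--     elif size_sq_ft >= 100 and size_sq_ft < 200:
--         return "Medium"
--     elif size_sq_ft >= 200 and size_sq_ft < 100000:
--         return "Large"
--     else:
--         raise ValueError(
--             f"Seomething is wrong with the sqare footage, it's either to big or some other invalid value: {size_sq_ft}")
-- ===== SOURCE B (Python) =====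
-- def size_category_tagging(size_text: str):
--     """
--     Single streaming pass: instead of collecting all digit runs as strings and
--     calling int() on the first two, walk the characters once with a shared
--     iterator, build each number arithmetically (ord(ch) - 48 accumulation) and
--     stop as soon as the second number is complete.
--     """
--     it = iter(size_text)
--
--     def next_number():
--         val = None
--         for ch in it:
--             if '0' <= ch <= '9':
--                 val = (0 if val is None else val) * 10 + (ord(ch) - 48)
--             elif val is not None:
--                 return val
--         if val is None:
--             raise IndexError('fewer than two dimensions in size text')
--         return val
--
--     size_sq_ft = next_number() * next_number()
--     if size_sq_ft >= 100000:
--         raise ValueError(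
--             f"Seomething is wrong with the sqare footage, it's either to big or some other invalid value: {size_sq_ft}")
--     return "Small" if size_sq_ft < 100 else "Medium" if size_sq_ft < 200 else "Large"
-- ===== Notes on version B (the rewrite author's own statement) =====
-- stated objective: alternative
-- what changed: A collects every digit run as a string in a list, filters out empties and calls int() on the first two; B makes one streaming pass with a shared character iterator, building each number arithmetically (val*10 + ord(ch)-48) and stopping as soon as the second number is complete, then classifies the product by direct threshold comparisons.
import Mathlib
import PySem

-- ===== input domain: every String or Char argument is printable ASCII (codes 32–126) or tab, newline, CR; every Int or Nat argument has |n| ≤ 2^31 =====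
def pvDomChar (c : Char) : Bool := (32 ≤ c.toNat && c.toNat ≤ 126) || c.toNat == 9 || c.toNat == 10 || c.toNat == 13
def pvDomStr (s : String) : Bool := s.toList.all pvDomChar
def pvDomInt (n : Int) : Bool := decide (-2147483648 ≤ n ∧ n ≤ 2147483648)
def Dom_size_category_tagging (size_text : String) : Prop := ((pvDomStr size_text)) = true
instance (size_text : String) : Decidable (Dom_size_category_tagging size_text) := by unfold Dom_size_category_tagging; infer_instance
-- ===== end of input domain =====

-- B replaces A's collect-runs-then-int() pipeline by one streaming pass that builds each
-- number arithmetically and stops after the second number; equal return value on Pre_.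

-- ===== PORT A =====
-- the body of A's for-loop: extend the current digit run, or flush it into tmp_dimensions
def pvStepA (acc : List Char × List (List Char)) (c : Char) : List Char × List (List Char) :=
  if PySem.Chars.isdigit c then (acc.1 ++ [c], acc.2) else ([], acc.2 ++ [acc.1])

-- int(): hand-ported decimal accumulation; exact on the nonempty ASCII digit runs
-- (characters collected under isdigit) which are the only strings A applies int() to
def pvIntOfDigits (ds : List Char) : Int :=
  ds.foldl (fun a c => a * 10 + ((c.toNat : Int) - 48)) 0

def size_category_tagging (size_text : String) : String :=
  let r := size_text.toList.foldl pvStepA ([], [])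
  -- for-else: one final append of tmp_char, then the empty-filter comprehension
  let tmp_dimensions := (r.2 ++ [r.1]).filter (fun d => decide (d ≠ []))
  match PySem.List.pyGet? tmp_dimensions 0, PySem.List.pyGet? tmp_dimensions 1 with
  | some d0, some d1 =>
    let size_sq_ft := pvIntOfDigits d0 * pvIntOfDigits d1
    if size_sq_ft < 100 then "Small"
    else if 100 ≤ size_sq_ft ∧ size_sq_ft < 200 then "Medium"
    else if 200 ≤ size_sq_ft ∧ size_sq_ft < 100000 then "Large"
    else ""  -- ValueError: excluded by Pre_
  | _, _ => ""  -- IndexError: excluded by Pre_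

-- ===== PORT B =====
-- B's nested next_number() over the shared iterator, modeled by threading the
-- remaining characters: returns (the parsed number, the unread suffix);
-- none = the IndexError B raises when the text runs out (excluded by Pre_)
def pvNextNum : List Char → Option Int → Option Int × List Char
  | [], val => (val, [])
  | c :: rest, val =>
    if decide ('0' ≤ c) && decide (c ≤ '9') then
      pvNextNum rest (some (val.getD 0 * 10 + ((c.toNat : Int) - 48)))
    else
      match val with
      | some v => (some v, rest)
      | none => pvNextNum rest val

def size_category_tagging_alt (size_text : String) : String :=
  match pvNextNum size_text.toList none with
  | (none, _) => ""  -- IndexError: excluded by Pre_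
  | (some a, rest1) =>
    match pvNextNum rest1 none with
    | (none, _) => ""  -- IndexError: excluded by Pre_
    | (some b, _) =>
      let size_sq_ft := a * b
      if 100000 ≤ size_sq_ft then ""  -- ValueError: excluded by Pre_
      else if size_sq_ft < 100 then "Small"
      else if size_sq_ft < 200 then "Medium"
      else "Large"

-- ===== PRECONDITION & SPEC =====
-- mask non-digits to spaces, so that split() yields the maximal digit runs
def pvMask (c : Char) : Char := if PySem.Chars.isdigit c then c else ' '

-- Pre_ excludes exactly the inputs where Python A raises: fewer than two maximal digit
-- runs (IndexError on tmp_dimensions[1]) or a first-two-runs product ≥ 100000 (ValueError).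
def Pre_size_category_tagging (size_text : String) : Prop :=
  let gs := PySem.Chars.split₀ (size_text.toList.map pvMask)
  2 ≤ gs.length ∧ pvIntOfDigits (gs.getD 0 []) * pvIntOfDigits (gs.getD 1 []) < 100000
instance (size_text : String) : Decidable (Pre_size_category_tagging size_text) := by
  unfold Pre_size_category_tagging; infer_instance
def pvWitness_size_category_tagging : String := "10x12"

def Spec_size_category_tagging (size_text : String) (out : String) : Prop := out = size_category_tagging_alt size_text
instance (size_text : String) (out : String) : Decidable (Spec_size_category_tagging size_text out) := by unfold Spec_size_category_tagging; infer_instance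

-- ===== CLAIM (what is proved, stated in full; the proofs are below) =====
def Claim_equal_size_category_tagging : Prop := ∀ (size_text : String), Dom_size_category_tagging size_text → Pre_size_category_tagging size_text → Spec_size_category_tagging size_text (size_category_tagging size_text)

-- ===== LEMMAS AND PROOFS =====

-- a digit character is not Python whitespace
lemma pv_digit_not_space (c : Char) (h : PySem.Chars.isdigit c = true) :
    PySem.Chars.isspace c = false := by
  simp [PySem.Chars.isdigit, Char.le_def] at h
  have h1 := UInt32.le_iff_toNat_le.1 h.1
  have h2 := UInt32.le_iff_toNat_le.1 h.2
  have e1 : (48 : UInt32).toNat = 48 := rfl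
  have e2 : (57 : UInt32).toNat = 57 := rfl
  rw [e1] at h1
  rw [e2] at h2
  unfold PySem.Chars.isspace
  have hc : c.toNat = c.val.toNat := rfl
  simp only [Bool.or_eq_false_iff, Bool.and_eq_false_iff, decide_eq_false_iff_not]
  omega

-- B's digit test is A's isdigit
lemma pv_digit_test (c : Char) :
    (decide ('0' ≤ c) && decide (c ≤ '9')) = PySem.Chars.isdigit c := rfl

-- loop invariant: A's accumulate-then-filter run equals split₀.go on the masked string
lemma pv_runs_go : ∀ (cs tmp : List Char) (dims : List (List Char)),
    ((cs.foldl pvStepA (tmp, dims)).2 ++ [(cs.foldl pvStepA (tmp, dims)).1]).filter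
        (fun d => decide (d ≠ []))
    = PySem.Chars.split₀.go (cs.map pvMask) tmp.reverse
        ((dims.filter (fun d => decide (d ≠ []))).reverse) := by
  intro cs
  induction cs with
  | nil =>
    intro tmp dims
    simp only [List.foldl_nil, List.map_nil, PySem.Chars.split₀.go, List.filter_append]
    by_cases h : tmp = []
    · subst h; simp
    · simp [h, List.isEmpty_iff]
  | cons c rest ih =>
    intro tmp dims
    by_cases hd : PySem.Chars.isdigit c
    · simp only [List.foldl_cons, List.map_cons, pvStepA, pvMask, hd, if_pos,
        PySem.Chars.split₀.go, pv_digit_not_space c hd]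
      rw [ih (tmp ++ [c]) dims]
      simp
    · simp only [List.foldl_cons, List.map_cons, pvStepA, pvMask, hd, if_false,
        Bool.false_eq_true, PySem.Chars.split₀.go]
      have hsp : PySem.Chars.isspace ' ' = true := by decide
      rw [hsp]
      simp only [if_true]
      by_cases h : tmp = []
      · subst h
        simp only [List.reverse_nil, List.isEmpty_nil, if_true]
        rw [ih [] (dims ++ [[]])]
        simp
      · have : (tmp.reverse.isEmpty) = false := by simp [h]
        rw [this]
        simp only [Bool.false_eq_true, if_false]
        rw [ih [] (dims ++ [tmp])]
        simp [h]

-- split₀.go's accumulator prepends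
lemma pv_go_acc : ∀ (l cur : List Char) (acc : List (List Char)),
    PySem.Chars.split₀.go l cur acc = acc.reverse ++ PySem.Chars.split₀.go l cur [] := by
  intro l
  induction l with
  | nil =>
    intro cur acc
    simp only [PySem.Chars.split₀.go]
    by_cases h : cur.isEmpty <;> simp [h]
  | cons c rest ih =>
    intro cur acc
    simp only [PySem.Chars.split₀.go]
    by_cases hs : PySem.Chars.isspace c
    · simp only [hs, if_true]
      by_cases h : cur.isEmpty
      · simp only [h, if_true]
        exact ih [] acc
      · simp only [h, Bool.false_eq_true, if_false]
        rw [ih [] (cur.reverse :: acc), ih [] [cur.reverse]]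
        simp
    · simp only [hs, Bool.false_eq_true, if_false]
      exact ih (c :: cur) acc

lemma pv_int_snoc (tmp : List Char) (c : Char) :
    pvIntOfDigits (tmp ++ [c]) = pvIntOfDigits tmp * 10 + ((c.toNat : Int) - 48) := by
  simp [pvIntOfDigits]

-- the streaming parser reads exactly the first masked-split group, and leaves a
-- suffix whose groups are the remaining ones
lemma pv_stream_go : ∀ (cs tmp : List Char),
    (match PySem.Chars.split₀.go (cs.map pvMask) tmp.reverse [] with
     | [] => pvNextNum cs (if tmp.isEmpty then none else some (pvIntOfDigits tmp)) = (none, [])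
     | g :: gs =>
        (pvNextNum cs (if tmp.isEmpty then none else some (pvIntOfDigits tmp))).1
            = some (pvIntOfDigits g) ∧
        PySem.Chars.split₀ ((pvNextNum cs
            (if tmp.isEmpty then none else some (pvIntOfDigits tmp))).2.map pvMask) = gs) := by
  intro cs
  induction cs with
  | nil =>
    intro tmp
    by_cases h : tmp = []
    · subst h; simp [PySem.Chars.split₀.go, pvNextNum]
    · have he : tmp.isEmpty = false := by simp [h]
      have hr : tmp.reverse.isEmpty = false := by simp [h]
      simp [PySem.Chars.split₀.go, pvNextNum, he, hr, PySem.Chars.split₀]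
  | cons c rest ih =>
    intro tmp
    by_cases hd : PySem.Chars.isdigit c
    · have hm : pvMask c = c := by simp [pvMask, hd]
      have hsp := pv_digit_not_space c hd
      have hstep : pvNextNum (c :: rest) (if tmp.isEmpty then none else some (pvIntOfDigits tmp))
          = pvNextNum rest (if (tmp ++ [c]).isEmpty then none else some (pvIntOfDigits (tmp ++ [c]))) := by
        by_cases h : tmp = []
        · subst h; simp [pvNextNum, pv_digit_test, hd, pvIntOfDigits]
        · simp [pvNextNum, pv_digit_test, hd, h, pv_int_snoc]
      have hgo : (((c :: rest).map pvMask)) = c :: rest.map pvMask := by simp [hm]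
      rw [hgo]
      simp only [PySem.Chars.split₀.go, hsp, Bool.false_eq_true, if_false, hstep]
      have : (c :: tmp.reverse) = (tmp ++ [c]).reverse := by simp
      rw [this]
      exact ih (tmp ++ [c])
    · have hm : pvMask c = ' ' := by simp [pvMask, hd]
      have hsp : PySem.Chars.isspace ' ' = true := by decide
      have hgo : (((c :: rest).map pvMask)) = ' ' :: rest.map pvMask := by simp [hm]
      rw [hgo]
      simp only [PySem.Chars.split₀.go, hsp, if_true]
      by_cases h : tmp = []
      · subst h
        simp only [List.reverse_nil, List.isEmpty_nil, if_true]
        have hstep : pvNextNum (c :: rest) (none : Option Int) = pvNextNum rest none := by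
          simp [pvNextNum, pv_digit_test, hd]
        rw [hstep]
        have h0 := ih []
        simp only [List.reverse_nil, List.isEmpty_nil, if_true] at h0
        exact h0
      · have hr : tmp.reverse.isEmpty = false := by simp [h]
        have he : tmp.isEmpty = false := by simp [h]
        rw [hr]
        simp only [Bool.false_eq_true, if_false, List.reverse_reverse]
        rw [pv_go_acc _ [] [tmp]]
        simp only [List.reverse_cons, List.reverse_nil, List.nil_append, List.singleton_append]
        have hstep : pvNextNum (c :: rest) (if tmp.isEmpty then none else some (pvIntOfDigits tmp))
            = (some (pvIntOfDigits tmp), rest) := by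
          simp [pvNextNum, pv_digit_test, hd, he]
        rw [hstep]
        exact ⟨rfl, rfl⟩

-- the two classification chains agree whenever the area is < 100000
lemma pv_classify_eq (x : Int) (hx : x < 100000) :
    (if x < 100 then "Small"
     else if 100 ≤ x ∧ x < 200 then "Medium"
     else if 200 ≤ x ∧ x < 100000 then "Large"
     else "")
    = (if 100000 ≤ x then ""
       else if x < 100 then "Small"
       else if x < 200 then "Medium"
       else "Large") := by
  split_ifs <;> first | rfl | omega

theorem pv_ports_eq (s : String) (hpre : Pre_size_category_tagging s) :
    size_category_tagging s = size_category_tagging_alt s := by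
  have hg : ((s.toList.foldl pvStepA ([], [])).2 ++ [(s.toList.foldl pvStepA ([], [])).1]).filter
        (fun d => decide (d ≠ []))
      = PySem.Chars.split₀ (s.toList.map pvMask) := by
    rw [pv_runs_go s.toList [] []]
    rfl
  unfold Pre_size_category_tagging at hpre
  rcases hgs : PySem.Chars.split₀ (s.toList.map pvMask) with _ | ⟨g0, gs'⟩
  · rw [hgs] at hpre; simp at hpre
  rcases gs' with _ | ⟨g1, rest⟩
  · rw [hgs] at hpre; simp at hpre
  rw [hgs] at hpre
  simp only [List.getD, List.getElem?_cons_zero, List.getElem?_cons_succ, Option.getD_some] at hpre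
  have harea : pvIntOfDigits g0 * pvIntOfDigits g1 < 100000 := hpre.2
  -- B's side: two applications of the streaming lemma
  have hb0 := pv_stream_go s.toList []
  rw [show (([] : List Char)).reverse = [] from rfl] at hb0
  have : PySem.Chars.split₀.go (s.toList.map pvMask) [] [] = g0 :: g1 :: rest := by
    rw [← hgs]; rfl
  rw [this] at hb0
  simp only [List.isEmpty_nil, if_true] at hb0
  obtain ⟨hb1, hb2⟩ := hb0
  rcases hp1 : pvNextNum s.toList none with ⟨o1, rest1⟩
  rw [hp1] at hb1 hb2
  simp only at hb1 hb2
  subst hb1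
  have hb3 := pv_stream_go rest1 []
  rw [show (([] : List Char)).reverse = [] from rfl] at hb3
  have hgo1 : PySem.Chars.split₀.go (rest1.map pvMask) [] [] = g1 :: rest := by
    rw [← hb2]; rfl
  rw [hgo1] at hb3
  simp only [List.isEmpty_nil, if_true] at hb3
  obtain ⟨hb4, _⟩ := hb3
  rcases hp2 : pvNextNum rest1 none with ⟨o2, rest2⟩
  rw [hp2] at hb4
  simp only at hb4
  subst hb4
  have hget0 : PySem.List.pyGet? (g0 :: g1 :: rest) (0 : Int) = some g0 := by
    simp [PySem.List.pyGet?, PySem.List.pyIdx?,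
      show ((0:Int) ≤ (rest.length:Int) + 1) from by positivity]
  have hget1 : PySem.List.pyGet? (g0 :: g1 :: rest) (1 : Int) = some g1 := by
    simp [PySem.List.pyGet?, PySem.List.pyIdx?]
  simp only [size_category_tagging, size_category_tagging_alt, hg, hgs, hp1, hp2,
    hget0, hget1]
  exact pv_classify_eq _ harea

-- ===== VERDICT (by name: the statement is the Claim_ definition above) =====
theorem size_category_tagging_spec : Claim_equal_size_category_tagging := by
  intro s _ hpre
  unfold Spec_size_category_tagging
  exact pv_ports_eq s hpre
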